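-- pv_equiv track=rewrite | github.com/InfiniTensor/InfiniLM | scripts/llava_first_token_smoke.py | expand_image_tokens
-- ===== SOURCE A (Python) =====
-- def expand_image_tokens(input_ids: list[int], image_token_index: int, n_image_tokens: int):
--     out_tokens: list[int] = []
--     override_pos: list[int] = []
--     for token in input_ids:
--         if token == image_token_index:
--             start = len(out_tokens)
--             out_tokens.extend([image_token_index] * n_image_tokens)
--             override_pos.extend(list(range(start, start + n_image_tokens)))
--         else:
--             out_tokens.append(token)
--     return out_tokens, override_pos
-- ===== SOURCE B (Python) =====
-- def expand_image_tokens(input_ids: list[int], image_token_index: int, n_image_tokens: int):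
--     # Pass 1: expand tokens.
--     out_tokens: list[int] = []
--     for token in input_ids:
--         if token == image_token_index:
--             out_tokens += [image_token_index] * n_image_tokens
--         else:
--             out_tokens.append(token)
--     # Pass 2: recover the inserted positions (only expanded slots hold image_token_index).
--     override_pos = [i for i, t in enumerate(out_tokens) if t == image_token_index]
--     return out_tokens, override_pos
-- ===== Notes on version B (the rewrite author's own statement) =====
-- stated objective: simpler
-- what changed: B no longer threads position bookkeeping through the expansion loop: it builds the expanded token list in one pass and then recovers override_pos by a separate enumerate-scan for image_token_index, relying on the invariant that pass-through tokens never equal it.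
import Mathlib
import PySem

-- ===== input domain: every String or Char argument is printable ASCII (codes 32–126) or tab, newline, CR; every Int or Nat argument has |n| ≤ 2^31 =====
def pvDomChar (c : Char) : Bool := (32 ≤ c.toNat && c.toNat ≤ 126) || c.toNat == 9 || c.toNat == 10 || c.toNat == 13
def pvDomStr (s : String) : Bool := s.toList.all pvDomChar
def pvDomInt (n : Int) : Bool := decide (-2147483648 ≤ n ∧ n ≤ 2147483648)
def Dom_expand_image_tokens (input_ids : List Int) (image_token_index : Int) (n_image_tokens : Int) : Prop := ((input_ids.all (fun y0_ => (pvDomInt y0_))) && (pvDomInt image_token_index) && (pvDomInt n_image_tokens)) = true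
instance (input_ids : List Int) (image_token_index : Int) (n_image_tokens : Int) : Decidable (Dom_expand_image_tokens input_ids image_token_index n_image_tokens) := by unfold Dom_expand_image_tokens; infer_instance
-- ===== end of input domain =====

-- ===== PORT A =====
-- B replaces the interleaved position bookkeeping with a second enumerate-scan of the output (objective: simpler).
def expand_image_tokens (input_ids : List Int) (image_token_index : Int) (n_image_tokens : Int) : List Int × List Int :=
  input_ids.foldl
    (fun st token =>
      if token = image_token_index then
        let start : Int := st.1.length
        (st.1 ++ List.replicate n_image_tokens.toNat image_token_index,
         st.2 ++ PySem.List.pyRange start (start + n_image_tokens) 1)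
      else
        (st.1 ++ [token], st.2))
    ([], [])

-- ===== PORT B =====
def expand_image_tokens_alt (input_ids : List Int) (image_token_index : Int) (n_image_tokens : Int) : List Int × List Int :=
  let out_tokens : List Int := input_ids.foldl
    (fun acc token =>
      if token = image_token_index then acc ++ List.replicate n_image_tokens.toNat image_token_index
      else acc ++ [token]) []
  let override_pos : List Int :=
    ((PySem.List.enumerate out_tokens 0).filter (fun p => p.2 == image_token_index)).map (fun p => p.1)
  (out_tokens, override_pos)

-- ===== PRECONDITION & SPEC =====
def Spec_expand_image_tokens (input_ids : List Int) (image_token_index : Int) (n_image_tokens : Int) (out : List Int × List Int) : Prop := out = expand_image_tokens_alt input_ids image_token_index n_image_tokens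
instance (input_ids : List Int) (image_token_index : Int) (n_image_tokens : Int) (out : List Int × List Int) : Decidable (Spec_expand_image_tokens input_ids image_token_index n_image_tokens out) := by unfold Spec_expand_image_tokens; infer_instance

-- ===== CLAIM (what is proved, stated in full; the proofs are below) =====
def Claim_equal_expand_image_tokens : Prop := ∀ (input_ids : List Int) (image_token_index : Int) (n_image_tokens : Int), Dom_expand_image_tokens input_ids image_token_index n_image_tokens → Spec_expand_image_tokens input_ids image_token_index n_image_tokens (expand_image_tokens input_ids image_token_index n_image_tokens)

-- ===== LEMMAS AND PROOFS =====

-- ===== VERDICT (by name: the statement is the Claim_ definition above) =====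
-- positions (relative to enumerate start s) of image_token_index in a list: the core of B's second pass
def pvPos (iti : Int) (o : List Int) (s : Int) : List Int :=
  ((PySem.List.enumerate o s).filter (fun p => p.2 == iti)).map (fun p => p.1)

theorem pvPos_append (iti : Int) (o l : List Int) (s : Int) :
    pvPos iti (o ++ l) s = pvPos iti o s ++ pvPos iti l (s + o.length) := by
  simp [pvPos, PySem.List.enumerate_append, List.filter_append]

theorem pvPos_replicate (iti : Int) (k : Nat) (s : Int) :
    pvPos iti (List.replicate k iti) s = PySem.List.pyRange s (s + k) 1 := by
  have hf : ((PySem.List.enumerate (List.replicate k iti) s).filter (fun p => p.2 == iti))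
      = PySem.List.enumerate (List.replicate k iti) s := by
    apply List.filter_eq_self.mpr
    intro p hp
    rcases (PySem.List.mem_enumerate_iff _ _ _).mp hp with ⟨j, hj, rfl⟩
    simp
  rw [pvPos, hf]
  have := PySem.List.map_fst_enumerate (List.replicate k iti) s
  simpa using this

theorem pvPos_single_ne (iti t : Int) (s : Int) (h : t ≠ iti) : pvPos iti [t] s = [] := by
  simp [pvPos, PySem.List.enumerate_cons, PySem.List.enumerate_nil, h]

theorem pvPos_nil (iti : Int) (s : Int) : pvPos iti [] s = [] := by
  simp [pvPos, PySem.List.enumerate_nil]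

theorem pyRange_toNat (s n : Int) :
    PySem.List.pyRange s (s + n) 1 = PySem.List.pyRange s (s + (n.toNat : Int)) 1 := by
  rw [PySem.List.pyRange_one, PySem.List.pyRange_one]
  have : (s + n - s).toNat = (s + (n.toNat : Int) - s).toNat := by omega
  rw [this]

theorem pvInvariant (iti n : Int) :
    ∀ (ids : List Int) (o : List Int),
      ids.foldl
        (fun st token =>
          if token = iti then
            let start : Int := st.1.length
            (st.1 ++ List.replicate n.toNat iti,
             st.2 ++ PySem.List.pyRange start (start + n) 1)
          else
            (st.1 ++ [token], st.2))
        (o, pvPos iti o 0)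
      = (ids.foldl
          (fun acc token =>
            if token = iti then acc ++ List.replicate n.toNat iti
            else acc ++ [token]) o,
         pvPos iti
          (ids.foldl
            (fun acc token =>
              if token = iti then acc ++ List.replicate n.toNat iti
              else acc ++ [token]) o) 0) := by
  intro ids
  induction ids with
  | nil => intro o; simp
  | cons t rest ih =>
    intro o
    by_cases h : t = iti
    · subst h
      simp only [List.foldl_cons]
      have e1 : (0 : Int) + (o.length : Int) = (o.length : Int) := by ring
      have hpos : pvPos t (o ++ List.replicate n.toNat t) 0
          = pvPos t o 0 ++ PySem.List.pyRange (o.length : Int) ((o.length : Int) + n) 1 := by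
        rw [pvPos_append, pvPos_replicate, e1, ← pyRange_toNat]
      rw [← hpos]
      exact ih (o ++ List.replicate n.toNat t)
    · simp only [List.foldl_cons, if_neg h]
      have hpos : pvPos iti (o ++ [t]) 0 = pvPos iti o 0 := by
        rw [pvPos_append, pvPos_single_ne iti t _ h, List.append_nil]
      rw [← hpos]
      exact ih (o ++ [t])

-- ===== VERDICT (by name: the statement is the Claim_ definition above) =====
theorem expand_image_tokens_spec : Claim_equal_expand_image_tokens := by
  intro ids iti n _
  show expand_image_tokens ids iti n = expand_image_tokens_alt ids iti n
  have h := pvInvariant iti n ids []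
  rw [pvPos_nil] at h
  simpa [expand_image_tokens, expand_image_tokens_alt, pvPos] using h
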